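-- pv_equiv track=rewrite | github.com/NPGrant81/fantasy-football-pi | backend/routers/draft.py | _parse_session_context
-- ===== SOURCE A (Python) =====
-- def _parse_session_context(session_id: str) -> tuple[int | None, int | None]:
--     league_id = None
--     draft_year = None
--     parts = (session_id or "").split("_")
--     for idx, value in enumerate(parts):
--         if value == "LEAGUE" and idx + 1 < len(parts):
--             try:
--                 league_id = int(parts[idx + 1])
--             except ValueError:
--                 league_id = None
--         if value == "YEAR" and idx + 1 < len(parts):
--             try:
--                 draft_year = int(parts[idx + 1])
--             except ValueError:
--                 draft_year = None
--     return league_id, draft_year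
-- ===== SOURCE B (Python) =====
-- def _parse_session_context(session_id: str) -> tuple[int | None, int | None]:
--     parts = (session_id or "").split("_")
--
--     def lookup(key):
--         # scan back-to-front; the first hit from the right is A's last-wins value
--         for i in range(len(parts) - 2, -1, -1):
--             if parts[i] == key:
--                 try:
--                     return int(parts[i + 1])
--                 except ValueError:
--                     return None
--         return None
--
--     return lookup("LEAGUE"), lookup("YEAR")
-- ===== Notes on version B (the rewrite author's own statement) =====
-- stated objective: alternative
-- what changed: Replaces A's single forward pass that maintains and overwrites two accumulators by two independent back-to-front searches that stop at the first keyword hit from the right (no accumulator state at all; early exit).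
import Mathlib
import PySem

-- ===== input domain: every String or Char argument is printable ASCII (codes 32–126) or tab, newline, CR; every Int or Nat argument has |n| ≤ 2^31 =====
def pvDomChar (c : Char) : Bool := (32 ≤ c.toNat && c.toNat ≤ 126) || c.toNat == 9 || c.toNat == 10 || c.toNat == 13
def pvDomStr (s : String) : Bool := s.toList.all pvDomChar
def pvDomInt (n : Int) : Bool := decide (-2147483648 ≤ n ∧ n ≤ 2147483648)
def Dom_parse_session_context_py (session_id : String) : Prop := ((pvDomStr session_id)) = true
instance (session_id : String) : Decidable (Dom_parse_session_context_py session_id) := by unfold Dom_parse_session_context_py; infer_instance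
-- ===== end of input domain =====

-- B replaces A's forward accumulator pass by two independent back-to-front searches with early exit (objective: alternative).
-- Note: Python's `(session_id or "")` equals session_id for every string, so both ports split session_id directly.

-- ===== PORT A =====
-- step of A's for-loop over enumerate(parts): the two sequential ifs; state = (league_id, draft_year);
-- `try: int(...) except ValueError: None` is PySem.Int.ofStr?
def pvStepA (parts : List String) (st : Option Int × Option Int) (p : Int × String) :
    Option Int × Option Int :=
  let st1 := if p.2 = "LEAGUE" ∧ p.1 + 1 < PySem.List.len parts then
      (PySem.Int.ofStr? (PySem.List.pyGetD parts (p.1 + 1) ""), st.2) else st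
  if p.2 = "YEAR" ∧ p.1 + 1 < PySem.List.len parts then
      (st1.1, PySem.Int.ofStr? (PySem.List.pyGetD parts (p.1 + 1) "")) else st1

def parse_session_context_py (session_id : String) : Option Int × Option Int :=
  let parts := (PySem.Str.split? session_id "_").getD []   -- sep "_" ≠ "", so split? is `some`
  (PySem.List.enumerate parts 0).foldl (pvStepA parts) (none, none)

-- ===== PORT B =====
-- Source B's lookup(key): for i in range(len(parts)-2, -1, -1): first keyword hit from the right
-- returns int(parts[i+1]) (ValueError → None); falls off the loop → None.
-- Indices drawn from the range are in bounds, so parts[i] / parts[i+1] are PySem.List.pyGetD.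
def pvLookupB (parts : List String) (key : String) : List Int → Option Int
  | [] => none
  | i :: rest =>
      if PySem.List.pyGetD parts i "" = key then
        PySem.Int.ofStr? (PySem.List.pyGetD parts (i + 1) "")
      else pvLookupB parts key rest

def parse_session_context_py_alt (session_id : String) : Option Int × Option Int :=
  let parts := (PySem.Str.split? session_id "_").getD []   -- sep "_" ≠ "", so split? is `some`
  let idxs := PySem.List.pyRange (PySem.List.len parts - 2) (-1) (-1)
  (pvLookupB parts "LEAGUE" idxs, pvLookupB parts "YEAR" idxs)

-- ===== PRECONDITION & SPEC =====
def Spec_parse_session_context_py (session_id : String) (out : Option Int × Option Int) : Prop := out = parse_session_context_py_alt session_id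
instance (session_id : String) (out : Option Int × Option Int) : Decidable (Spec_parse_session_context_py session_id out) := by unfold Spec_parse_session_context_py; infer_instance

-- ===== CLAIM (what is proved, stated in full; the proofs are below) =====
def Claim_equal_parse_session_context_py : Prop := ∀ (session_id : String), Dom_parse_session_context_py session_id → Spec_parse_session_context_py session_id (parse_session_context_py session_id)

-- ===== LEMMAS AND PROOFS =====

-- the simple keyed scan over successor pairs computes the last-match lookups
def pvStepP (st : Option Int × Option Int) (p : String × String) : Option Int × Option Int :=
  let st1 := if p.1 = "LEAGUE" then (PySem.Int.ofStr? p.2, st.2) else st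
  if p.1 = "YEAR" then (st1.1, PySem.Int.ofStr? p.2) else st1

lemma foldP_eq (l : List (String × String)) :
    l.foldl pvStepP (none, none)
      = (((l.reverse.find? (fun p => p.1 == "LEAGUE")).map (·.2)).bind PySem.Int.ofStr?,
         ((l.reverse.find? (fun p => p.1 == "YEAR")).map (·.2)).bind PySem.Int.ofStr?) := by
  induction l using List.reverseRecOn with
  | nil => simp
  | append_singleton t p ih =>
      simp only [List.foldl_append, List.foldl_cons, List.foldl_nil, ih,
        List.reverse_append, List.reverse_cons, List.reverse_nil, List.nil_append]
      by_cases h1 : p.1 = "LEAGUE"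
      · simp [pvStepP, h1]
      · by_cases h2 : p.1 = "YEAR"
        · simp [pvStepP, h2]
        · simp [pvStepP, h1, h2]

-- B's early-exit scan over an index list = find?-then-parse over the corresponding pairs
lemma pvLookupB_eq (parts : List String) (key : String) (l : List Int) :
    pvLookupB parts key l
      = (((l.map (fun i => (PySem.List.pyGetD parts i "", PySem.List.pyGetD parts (i + 1) ""))).find?
            (fun p => p.1 == key)).map (·.2)).bind PySem.Int.ofStr? := by
  induction l with
  | nil => simp [pvLookupB]
  | cons i rest ih =>
      by_cases h : PySem.List.pyGetD parts i "" = key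
      · simp [pvLookupB, h]
      · simp [pvLookupB, h, ih]

-- core equality over an arbitrary parts list
lemma pv_main (parts : List String) :
    (PySem.List.enumerate parts 0).foldl (pvStepA parts) (none, none)
      = (pvLookupB parts "LEAGUE" (PySem.List.pyRange (PySem.List.len parts - 2) (-1) (-1)),
         pvLookupB parts "YEAR" (PySem.List.pyRange (PySem.List.len parts - 2) (-1) (-1))) := by
  have hrev : PySem.List.pyRange (PySem.List.len parts - 2) (-1) (-1)
      = (PySem.List.pyRange 0 (PySem.List.len parts - 1) 1).reverse := by
    rw [PySem.List.pyRange_neg_one_eq_reverse]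
    norm_num
    congr 1
    omega
  have hL : ∀ key, pvLookupB parts key (PySem.List.pyRange (PySem.List.len parts - 2) (-1) (-1))
      = ((((PySem.List.pyRange 0 (PySem.List.len parts - 1) 1).map
            (fun i => (PySem.List.pyGetD parts i "", PySem.List.pyGetD parts (i + 1) ""))).reverse.find?
            (fun p => p.1 == key)).map (·.2)).bind PySem.Int.ofStr? := by
    intro key
    rw [pvLookupB_eq, hrev, List.map_reverse]
  rw [hL, hL]
  rcases eq_or_ne parts [] with h | h
  · subst h; decide
  · have hlp : 0 < parts.length := List.length_pos_iff.mpr h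
    have hn : 1 ≤ PySem.List.len parts := by simp [PySem.List.len_eq]; omega
    rw [PySem.List.enumerate_eq_map_pyRange parts ""]
    rw [show List.foldl (pvStepA parts) ((none, none) : Option Int × Option Int)
          ((PySem.List.pyRange 0 (PySem.List.len parts) 1).map
            (fun j => (j, PySem.List.pyGetD parts j "")))
        = List.foldl (fun st (j : Int) => pvStepA parts st (j, PySem.List.pyGetD parts j ""))
            (none, none) (PySem.List.pyRange 0 (PySem.List.len parts) 1) from
        List.foldl_map]
    set n := PySem.List.len parts with hn'
    rw [PySem.List.pyRange_one_append 0 (n - 1) n (by omega) (by omega), List.foldl_append]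
    have hsing : PySem.List.pyRange (n - 1) n 1 = [n - 1] := by
      have hs := PySem.List.pyRange_one_singleton (n - 1)
      rw [show n - 1 + 1 = n from by omega] at hs
      exact hs
    have hstep : ∀ st : Option Int × Option Int,
        pvStepA parts st (n - 1, PySem.List.pyGetD parts (n - 1) "") = st := by
      intro st
      simp only [pvStepA, ← hn']
      simp
    rw [hsing]
    simp only [List.foldl_cons, List.foldl_nil, hstep]
    have hcongr : ∀ (acc : Option Int × Option Int), ∀ i ∈ PySem.List.pyRange 0 (n - 1) 1,
        pvStepA parts acc (i, PySem.List.pyGetD parts i "")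
          = pvStepP acc (PySem.List.pyGetD parts i "", PySem.List.pyGetD parts (i + 1) "") := by
      intro acc i hi
      rw [PySem.List.mem_pyRange_one] at hi
      have hg : i + 1 < (parts.length : Int) := by
        have h2 := hi.2
        rw [hn'] at h2
        simp only [PySem.List.len_eq] at h2
        omega
      simp [pvStepA, pvStepP, hg]
    rw [PySem.List.foldl_congr_mem (PySem.List.pyRange 0 (n - 1) 1)
        (fun st (j : Int) => pvStepA parts st (j, PySem.List.pyGetD parts j ""))
        (fun st (j : Int) => pvStepP st (PySem.List.pyGetD parts j "", PySem.List.pyGetD parts (j + 1) ""))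
        (none, none) hcongr]
    rw [show List.foldl
          (fun st (j : Int) => pvStepP st (PySem.List.pyGetD parts j "", PySem.List.pyGetD parts (j + 1) ""))
          ((none, none) : Option Int × Option Int) (PySem.List.pyRange 0 (n - 1) 1)
        = ((PySem.List.pyRange 0 (n - 1) 1).map
            (fun j => (PySem.List.pyGetD parts j "", PySem.List.pyGetD parts (j + 1) ""))).foldl
            pvStepP (none, none) from
        (List.foldl_map
          (f := fun j : Int => (PySem.List.pyGetD parts j "", PySem.List.pyGetD parts (j + 1) ""))
          (g := pvStepP)).symm]
    rw [foldP_eq]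

-- ===== VERDICT (by name: the statement is the Claim_ definition above) =====
theorem parse_session_context_py_spec : Claim_equal_parse_session_context_py := by
  intro s _
  unfold Spec_parse_session_context_py parse_session_context_py parse_session_context_py_alt
  exact pv_main _
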